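-- pv_equiv track=rewrite | github.com/SongZzi/coding_test | programmers/level1/210217_17681.py | solution
-- ===== SOURCE A (Python) =====
-- def solution(n, arr1, arr2):
--     answer = []
--     value1 = []
--     value2 = []
--     res = ""
--
--     for i in range(int(n)):
--         for m in range(int(n)):
--             value1.append(0)
--             value2.append(0)
--
--         a = format(arr1[i], 'b')
--         b = format(arr2[i], 'b')
--         x = len(a)
--         y = len(b)
--
--         for j in range(int(n), int(n) - len(a), -1):
--             value1[j - 1] = int(a[x - 1])
--             x = x - 1
--
--         for k in range(int(n), int(n) - len(b), -1):
--             value2[k - 1] = int(b[y - 1])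
--             y = y - 1
--
--         res = ""
--         for z in range(int(n)):
--             if value1[z] == 1 or value2[z] == 1:
--                 res = res + "#"
--             elif value1[z] == 0 and value2[z] == 0:
--                 res = res + " "
--         answer.append(str(res))
--
--         value1 = []
--         value2 = []
--
--     return answer
-- ===== SOURCE B (Python) =====
-- def solution(n, arr1, arr2):
--     n = int(n)
--     return ["".join("#" if c == "1" else " " for c in format(arr1[i] | arr2[i], "b").zfill(n))
--             for i in range(n)]
-- ===== Notes on version B (the rewrite author's own statement) =====
-- stated objective: simpler
-- what changed: Replaces A's two n-length 0/1 bit-arrays, the per-bit reconstruction loops with hand-maintained cursors and the positional comparison loop by a single integer OR per row, rendered as a zero-filled binary string whose digits are mapped to '#'/' '.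
-- outside the precondition, e.g. on solution(1, [2], [0]): A returns ['#'], B returns ['# ']
import Mathlib
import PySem

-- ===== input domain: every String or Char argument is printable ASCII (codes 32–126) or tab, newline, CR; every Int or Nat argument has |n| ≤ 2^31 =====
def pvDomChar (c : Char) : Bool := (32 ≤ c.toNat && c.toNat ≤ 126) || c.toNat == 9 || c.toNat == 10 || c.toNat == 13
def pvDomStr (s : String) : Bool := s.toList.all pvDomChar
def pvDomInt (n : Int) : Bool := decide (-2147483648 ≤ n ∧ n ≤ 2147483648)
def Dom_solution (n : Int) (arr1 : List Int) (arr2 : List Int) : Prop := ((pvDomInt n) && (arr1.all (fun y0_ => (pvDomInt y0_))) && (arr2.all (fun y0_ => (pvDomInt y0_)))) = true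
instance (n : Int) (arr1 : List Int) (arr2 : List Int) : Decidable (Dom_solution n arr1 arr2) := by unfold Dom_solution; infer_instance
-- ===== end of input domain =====

-- B replaces A's two n-length 0/1 bit-arrays, the per-bit reconstruction loops and the positional
-- comparison loop by one integer OR per row, rendered as a zero-filled binary string mapped to '#'/' '
-- (objective: simpler; equal on Pre_).

-- ===== PORT A =====
-- loop body of A's outer `for i in range(int(n))` (state: answer, value1, value2)
def solStep (n : Int) (arr1 : List Int) (arr2 : List Int)
    (st : List String × List Int × List Int) (i : Int) : List String × List Int × List Int :=
  -- for m in range(int(n)): value1.append(0); value2.append(0)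
  let vz := (PySem.List.pyRange 0 n 1).foldl
      (fun (p : List Int × List Int) _ => (p.1 ++ [0], p.2 ++ [0])) (st.2.1, st.2.2)
  let a := PySem.Int.toBinChars (PySem.List.pyGetD arr1 i 0)   -- a = format(arr1[i], 'b')
  let b := PySem.Int.toBinChars (PySem.List.pyGetD arr2 i 0)   -- b = format(arr2[i], 'b')
  -- for j in range(int(n), int(n)-len(a), -1): value1[j-1] = int(a[x-1]); x -= 1
  let w1 := (PySem.List.pyRange n (n - (a.length : Int)) (-1)).foldl
      (fun (p : List Int × Int) j =>
        (PySem.List.pySetD p.1 (j - 1)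
          ((PySem.Int.ofChars? [PySem.List.pyGetD a (p.2 - 1) ' ']).getD 0), p.2 - 1))
      (vz.1, (a.length : Int))
  -- for k in range(int(n), int(n)-len(b), -1): value2[k-1] = int(b[y-1]); y -= 1
  let w2 := (PySem.List.pyRange n (n - (b.length : Int)) (-1)).foldl
      (fun (p : List Int × Int) k =>
        (PySem.List.pySetD p.1 (k - 1)
          ((PySem.Int.ofChars? [PySem.List.pyGetD b (p.2 - 1) ' ']).getD 0), p.2 - 1))
      (vz.2, (b.length : Int))
  -- res = ""; for z in range(int(n)): …
  let res := (PySem.List.pyRange 0 n 1).foldl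
      (fun (res : List Char) z =>
        if PySem.List.pyGetD w1.1 z 0 = 1 ∨ PySem.List.pyGetD w2.1 z 0 = 1 then res ++ ['#']
        else if PySem.List.pyGetD w1.1 z 0 = 0 ∧ PySem.List.pyGetD w2.1 z 0 = 0 then res ++ [' ']
        else res) []
  (st.1 ++ [String.ofList res], [], [])    -- answer.append(str(res)); value1 = []; value2 = []

def solution (n : Int) (arr1 : List Int) (arr2 : List Int) : List String :=
  ((PySem.List.pyRange 0 n 1).foldl (solStep n arr1 arr2) ([], [], [])).1

-- ===== PORT B =====
-- "".join("#" if c == "1" else " " for c in format(arr1[i] | arr2[i], "b").zfill(n))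
def rowAlt (n : Int) (arr1 : List Int) (arr2 : List Int) (i : Int) : String :=
  String.ofList ((PySem.Chars.zfill (PySem.Int.toBinChars
      (PySem.Int.bor (PySem.List.pyGetD arr1 i 0) (PySem.List.pyGetD arr2 i 0))) n).map
    (fun c => if c = '1' then '#' else ' '))

def solution_alt (n : Int) (arr1 : List Int) (arr2 : List Int) : List String :=
  (PySem.List.pyRange 0 n 1).map (rowAlt n arr1 arr2)

-- ===== PRECONDITION & SPEC =====
-- Pre_ excludes (a) inputs where A raises: a list shorter than n (IndexError on arr[i]), a negative
-- value among the first n (int('-') is a ValueError), a value of 2n or more binary digits (the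
-- wrapped write index goes below -n: IndexError); and (b) the out-of-spec values with more than n
-- binary digits (2^n ≤ v < 2^2n), the corner this problem's contract ('each value below 2^n')
-- leaves unspecified: there A's negative-index writes wrap around into an accidental n-character
-- row while B renders the row's full binary string (wider than n) — both rows are accidental and
-- neither is the specified value, so those inputs are excluded rather than matched.
def Pre_solution (n : Int) (arr1 : List Int) (arr2 : List Int) : Prop :=
  n ≤ (arr1.length : Int) ∧ n ≤ (arr2.length : Int) ∧
    ∀ v ∈ arr1.take n.toNat ++ arr2.take n.toNat, 0 ≤ v ∧ v < 2 ^ n.toNat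
instance (n : Int) (arr1 : List Int) (arr2 : List Int) : Decidable (Pre_solution n arr1 arr2) := by
  unfold Pre_solution; infer_instance
def pvWitness_solution : Int × List Int × List Int := (2, [1, 2], [3, 0])

def Spec_solution (n : Int) (arr1 : List Int) (arr2 : List Int) (out : List String) : Prop :=
  out = solution_alt n arr1 arr2
instance (n : Int) (arr1 : List Int) (arr2 : List Int) (out : List String) :
    Decidable (Spec_solution n arr1 arr2 out) := by unfold Spec_solution; infer_instance

-- ===== CLAIM (what is proved, stated in full; the proofs are below) =====
def Claim_equal_solution : Prop := ∀ (n : Int) (arr1 : List Int) (arr2 : List Int), Dom_solution n arr1 arr2 → Pre_solution n arr1 arr2 → Spec_solution n arr1 arr2 (solution n arr1 arr2)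

-- ===== LEMMAS AND PROOFS =====

lemma pyRange_nonpos (n : Int) (h : n ≤ 0) : PySem.List.pyRange 0 n 1 = [] := by
  rw [PySem.List.pyRange_of_pos 0 n (by norm_num)]
  simp [show ¬ (0 < n) by omega]

lemma pyRange_desc (a : Int) (L : Nat) :
    PySem.List.pyRange a (a - (L : Int)) (-1) = (List.range L).map (fun t : Nat => a - (t : Int)) := by
  show (if (-1 : Int) = 0 then _ else _) = _
  rw [if_neg (by norm_num)]
  simp only [show ¬ ((0:Int) < -1) by norm_num, if_false]
  rcases Nat.eq_zero_or_pos L with h | h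
  · subst h; simp
  · rw [if_pos (by omega)]
    have : (a - (a - (L:Int)) + - -1 - 1) / - -1 = (L : Int) := by push_cast; ring_nf; simp
    rw [this, Int.toNat_natCast]
    apply List.map_congr_left; intro k _; ring

def bchars (m : Nat) : List Char :=
  if _h : m < 2 then [Nat.digitChar m]
  else bchars (m / 2) ++ [Nat.digitChar (m % 2)]
decreasing_by exact Nat.div_lt_self (by omega) (by omega)

lemma bchars_lt_two {m : Nat} (h : m < 2) : bchars m = [Nat.digitChar m] := by
  rw [bchars]; simp [h]

lemma bchars_ge_two {m : Nat} (h : 2 ≤ m) : bchars m = bchars (m / 2) ++ [Nat.digitChar (m % 2)] := by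
  rw [bchars]; simp [show ¬ m < 2 by omega]

lemma digitChar_mod_two (m : Nat) : Nat.digitChar (m % 2) = '0' ∨ Nat.digitChar (m % 2) = '1' := by
  rcases Nat.mod_two_eq_zero_or_one m with h | h <;> rw [h]
  · left; rfl
  · right; rfl

lemma bchars_ne_nil (m : Nat) : bchars m ≠ [] := by
  rcases Nat.lt_or_ge m 2 with h | h
  · rw [bchars_lt_two h]; simp
  · rw [bchars_ge_two h]; simp

lemma bchars_mem (m : Nat) : ∀ c ∈ bchars m, c = '0' ∨ c = '1' := by
  induction m using Nat.strong_induction_on with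
  | _ m ih =>
    rcases Nat.lt_or_ge m 2 with h | h
    · rw [bchars_lt_two h]
      intro c hc
      have hc : c = Nat.digitChar m := by simpa using hc
      subst hc
      have : m = m % 2 := by omega
      rw [this]; exact digitChar_mod_two m
    · rw [bchars_ge_two h]
      intro c hc
      rcases List.mem_append.1 hc with hc | hc
      · exact ih (m / 2) (Nat.div_lt_self (by omega) (by omega)) c hc
      · have : c = Nat.digitChar (m % 2) := by simpa using hc
        subst this; exact digitChar_mod_two m

lemma bchars_length_le : ∀ (k : Nat), ∀ m : Nat, m < 2 ^ k → 1 ≤ k → (bchars m).length ≤ k := by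
  intro k
  induction k with
  | zero => intro m _ h; omega
  | succ k ih =>
    intro m hm _
    rcases Nat.lt_or_ge m 2 with h | h
    · rw [bchars_lt_two h]; simp
    · have hk : 1 ≤ k := by
        rcases Nat.eq_zero_or_pos k with h0 | h0
        · subst h0; norm_num at hm; omega
        · exact h0
      rw [bchars_ge_two h]
      have hd : m / 2 < 2 ^ k := by
        rw [pow_succ] at hm; omega
      have := ih (m / 2) hd hk
      simp only [List.length_append, List.length_cons, List.length_nil]
      omega

lemma toDigitsCore_succ (f m : Nat) (acc : List Char) :
    Nat.toDigitsCore 2 (f + 1) m acc =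
      if m / 2 = 0 then (m % 2).digitChar :: acc
      else Nat.toDigitsCore 2 f (m / 2) ((m % 2).digitChar :: acc) := by
  rfl

lemma toDigitsCore_eq_bchars : ∀ (f m : Nat) (acc : List Char), m < 2 ^ (f + 1) →
    Nat.toDigitsCore 2 (f + 1) m acc = bchars m ++ acc := by
  intro f
  induction f with
  | zero =>
    intro m acc hm
    have h2 : m < 2 := by norm_num at hm; omega
    rw [toDigitsCore_succ, if_pos (by omega), bchars_lt_two h2]
    have : m % 2 = m := by omega
    rw [this]; rfl
  | succ f ih =>
    intro m acc hm
    rcases Nat.lt_or_ge m 2 with h2 | h2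
    · rw [toDigitsCore_succ, if_pos (by omega), bchars_lt_two h2]
      have : m % 2 = m := by omega
      rw [this]; rfl
    · rw [toDigitsCore_succ, if_neg (by omega),
        ih (m / 2) _ (by rw [pow_succ] at hm; omega), bchars_ge_two h2]
      simp

lemma toDigits_eq_bchars (m : Nat) : Nat.toDigits 2 m = bchars m := by
  have h : Nat.toDigits 2 m = Nat.toDigitsCore 2 (m + 1) m [] := rfl
  rw [h, toDigitsCore_eq_bchars m m []
    (lt_of_lt_of_le Nat.lt_two_pow_self (Nat.pow_le_pow_right (by omega) (by omega)))]
  simp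

lemma digitChar_testBit (m : Nat) :
    Nat.digitChar (m % 2) = if m.testBit 0 then '1' else '0' := by
  rcases Nat.mod_two_eq_zero_or_one m with h | h <;> simp [Nat.testBit_zero, h] <;> rfl

lemma bchars_lsb : ∀ (k m : Nat), m < 2 ^ k → 1 ≤ k →
    (bchars m).reverse ++ List.replicate (k - (bchars m).length) '0'
      = (List.range k).map (fun i => if m.testBit i then '1' else '0') := by
  intro k
  induction k with
  | zero => intro m _ h; omega
  | succ k ih =>
    intro m hm _
    rw [List.range_succ_eq_map, List.map_cons]
    have hc0 : Nat.digitChar (m % 2) = if m.testBit 0 then '1' else '0' := digitChar_testBit m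
    rcases Nat.lt_or_ge m 2 with h2 | h2
    · -- bchars m = [digitChar m]
      have hmm : m % 2 = m := by omega
      rw [bchars_lt_two h2]
      simp only [List.reverse_singleton, List.length_singleton, List.singleton_append]
      have htail : (List.map Nat.succ (List.range k)).map (fun i => if m.testBit i then '1' else '0')
          = List.replicate k '0' := by
        rw [List.map_map]
        have : ∀ i ∈ List.range k, ((fun i => if m.testBit i then '1' else '0') ∘ Nat.succ) i = '0' := by
          intro i _
          simp [Function.comp_apply, Nat.testBit_succ, show m / 2 = 0 by omega,
            Nat.zero_testBit]
        rw [List.map_congr_left this, List.map_const']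
        simp
      rw [htail, ← hc0, hmm]
      norm_num
    · rw [bchars_ge_two h2]
      have hd : m / 2 < 2 ^ k := by rw [pow_succ] at hm; omega
      have hk : 1 ≤ k := by
        rcases Nat.eq_zero_or_pos k with h0 | h0
        · subst h0; norm_num at hm; omega
        · exact h0
      have hih := ih (m / 2) hd hk
      simp only [List.reverse_append, List.reverse_singleton, List.length_append,
        List.length_cons, List.length_nil, List.cons_append, List.nil_append, Nat.zero_add]
      have hlen : (k + 1) - ((bchars (m/2)).length + 1) = k - (bchars (m/2)).length := by omega
      congr 1
      all_goals first
        | exact hc0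
        | (rw [hlen, hih, List.map_map]
           apply List.map_congr_left
           intro i _
           simp [Nat.testBit_succ])

lemma bchars_msb (k m : Nat) (hm : m < 2 ^ k) (hk : 1 ≤ k) :
    List.replicate (k - (bchars m).length) '0' ++ bchars m
      = (List.range k).map (fun z => if m.testBit (k - 1 - z) then '1' else '0') := by
  have h := bchars_lsb k m hm hk
  have h2 := congrArg List.reverse h
  rw [List.reverse_append, List.reverse_reverse, List.reverse_replicate] at h2
  rw [h2]
  apply List.ext_getElem
  · simp
  · intro t h1 h2
    rw [List.getElem_reverse]
    simp only [List.getElem_map, List.getElem_range, List.length_map, List.length_range]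

lemma toBinChars_natCast (m : Nat) : PySem.Int.toBinChars (m : Int) = bchars m := by
  unfold PySem.Int.toBinChars
  rw [if_neg (by omega)]
  simp [toDigits_eq_bchars]

lemma zfill_digits (cs : List Char) (N : Nat) (hne : cs ≠ [])
    (hc : ∀ c ∈ cs, c = '0' ∨ c = '1') :
    PySem.Chars.zfill cs (N : Int) = List.replicate (N - cs.length) '0' ++ cs := by
  unfold PySem.Chars.zfill
  by_cases h : (N : Int) ≤ (cs.length : Int)
  · rw [if_pos h]
    have : N - cs.length = 0 := by omega
    rw [this]; simp
  · rw [if_neg h]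
    cases cs with
    | nil => exact absurd rfl hne
    | cons c rest =>
      have hcc := hc c (by simp)
      have hnc : ¬ (c = '+' ∨ c = '-') := by
        rcases hcc with h' | h' <;> subst h' <;> decide
      show (if c = '+' ∨ c = '-' then c :: (List.replicate ((N:Int).toNat - (c :: rest).length) '0' ++ rest)
        else List.replicate ((N:Int).toNat - (c :: rest).length) '0' ++ c :: rest) = _
      rw [if_neg hnc]
      congr 2

def cval (c : Char) : Int := if c = '1' then 1 else 0

lemma ofChars_getD_cval (c : Char) (h : c = '0' ∨ c = '1') :
    (PySem.Int.ofChars? [c]).getD 0 = cval c := by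
  rcases h with h | h <;> subst h <;> decide

-- zeros loop
lemma zeros_loop (l : List Int) : ∀ (u v : List Int),
    l.foldl (fun (p : List Int × List Int) _ => (p.1 ++ [0], p.2 ++ [0])) (u, v)
      = (u ++ List.replicate l.length 0, v ++ List.replicate l.length 0) := by
  induction l with
  | nil => intro u v; simp
  | cons x l ih =>
    intro u v
    rw [List.foldl_cons, ih]
    simp [List.replicate_succ]

lemma write_loop_gen (cs : List Char) (N : Nat) (hc : ∀ c ∈ cs, c = '0' ∨ c = '1')
    (hle : cs.length ≤ N) : ∀ (r k : Nat), k + r = cs.length →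
    ((List.range r).map (fun t : Nat => ((N : Int) - (k : Int)) - (t : Int))).foldl
      (fun (p : List Int × Int) j =>
        (PySem.List.pySetD p.1 (j - 1)
          ((PySem.Int.ofChars? [PySem.List.pyGetD cs (p.2 - 1) ' ']).getD 0), p.2 - 1))
      (List.replicate (N - k) 0 ++ (cs.drop (cs.length - k)).map cval, ((cs.length - k : Nat) : Int))
    = (List.replicate (N - cs.length) 0 ++ cs.map cval, ((0 : Nat) : Int)) := by
  intro r
  induction r with
  | zero =>
    intro k hk
    have : k = cs.length := by omega
    subst this
    simp
  | succ r ih =>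
    intro k hk
    rw [List.range_succ_eq_map, List.map_cons, List.foldl_cons]
    have hkl : k < cs.length := by omega
    have hidx : cs.length - k - 1 < cs.length := by omega
    -- the read: p.2 - 1 = cs.length - (k+1)
    have hx : ((cs.length - k : Nat) : Int) - 1 = ((cs.length - (k + 1) : Nat) : Int) := by
      omega
    have hread : PySem.List.pyGetD cs (((cs.length - (k + 1) : Nat) : Int)) ' '
        = cs[cs.length - k - 1]'(by omega) := by
      rw [PySem.List.pyGetD_natCast]
      rw [List.getD_eq_getElem _ _ (by omega)]
      simp [Nat.sub_sub]
    -- the write index: j - 1 = N - 1 - k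
    have hj : ((N : Int) - (k : Int)) - ((0:Nat) : Int) - 1 = ((N - 1 - k : Nat) : Int) := by
      push_cast; omega
    have hset : PySem.List.pySetD
        (List.replicate (N - k) 0 ++ (cs.drop (cs.length - k)).map cval)
        (((N - 1 - k : Nat) : Int)) (cval (cs[cs.length - k - 1]'(by omega)))
        = List.replicate (N - (k + 1)) 0 ++ (cs.drop (cs.length - (k + 1))).map cval := by
      rw [PySem.List.pySetD_natCast]
      rw [List.set_append]
      rw [if_pos (by simp only [List.length_replicate]; omega)]
      have hrep : List.replicate (N - k) (0 : Int) = List.replicate (N - k - 1) 0 ++ [0] := by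
        rw [← List.replicate_succ']
        congr 1
        omega
      rw [hrep, List.set_append, if_neg (by simp only [List.length_replicate]; omega), List.length_replicate]
      have : N - 1 - k - (N - k - 1) = 0 := by omega
      rw [this]
      have hdrop : cs.drop (cs.length - (k + 1))
          = cs[cs.length - k - 1]'(by omega) :: cs.drop (cs.length - k) := by
        rw [show cs.length - (k+1) = cs.length - k - 1 from by omega,
          List.drop_eq_getElem_cons hidx,
          show cs.length - k - 1 + 1 = cs.length - k from by omega]
      rw [hdrop, List.map_cons]
      rw [show N - (k + 1) = N - k - 1 from by omega]
      simp [List.append_assoc]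
    rw [hx, hread, ofChars_getD_cval _ (hc _ (List.getElem_mem _)), hj, hset]
    have harg2 : (List.map Nat.succ (List.range r)).map (fun t : Nat => ((N : Int) - (k : Int)) - (t : Int))
        = (List.range r).map (fun t : Nat => ((N : Int) - (((k + 1) : Nat) : Int)) - (t : Int)) := by
      rw [List.map_map]
      apply List.map_congr_left
      intro t _
      simp only [Function.comp_apply]
      push_cast
      omega
    rw [harg2]
    exact ih (k + 1) (by omega)

lemma res_loop (N : Nat) (v1 v2 : List Int)
    (hl1 : v1.length = N) (hl2 : v2.length = N)
    (h1 : ∀ x ∈ v1, x = 0 ∨ x = 1) (h2 : ∀ x ∈ v2, x = 0 ∨ x = 1) :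
    (PySem.List.pyRange 0 ((N : Nat) : Int) 1).foldl
      (fun (res : List Char) z =>
        if PySem.List.pyGetD v1 z 0 = 1 ∨ PySem.List.pyGetD v2 z 0 = 1 then res ++ ['#']
        else if PySem.List.pyGetD v1 z 0 = 0 ∧ PySem.List.pyGetD v2 z 0 = 0 then res ++ [' ']
        else res) []
    = (List.range N).map
        (fun t => if v1.getD t 0 = 1 ∨ v2.getD t 0 = 1 then '#' else ' ') := by
  rw [PySem.List.pyRange_zero_natCast N, List.foldl_map]
  rw [PySem.List.foldl_congr_mem (List.range N) _
    (fun (res : List Char) t =>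
      res ++ [if v1.getD t 0 = 1 ∨ v2.getD t 0 = 1 then '#' else ' ']) []
    ?_]
  · rw [PySem.List.foldl_append_singleton_eq_map]
    simp
  · intro acc t ht
    rw [List.mem_range] at ht
    rw [PySem.List.pyGetD_natCast, PySem.List.pyGetD_natCast]
    by_cases hA : v1.getD t 0 = 1 ∨ v2.getD t 0 = 1
    · show _ = acc ++ [if v1.getD t 0 = 1 ∨ v2.getD t 0 = 1 then '#' else ' ']
      rw [if_pos hA]
      rw [if_pos hA]
    · rw [if_neg hA]
      have e1 : v1.getD t 0 = v1[t]'(by omega) := List.getD_eq_getElem _ _ (by omega)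
      have e2 : v2.getD t 0 = v2[t]'(by omega) := List.getD_eq_getElem _ _ (by omega)
      have m1 := h1 _ (List.getElem_mem (l := v1) (n := t) (by omega))
      have m2 := h2 _ (List.getElem_mem (l := v2) (n := t) (by omega))
      show _ = acc ++ [if v1.getD t 0 = 1 ∨ v2.getD t 0 = 1 then '#' else ' ']
      rw [if_pos ⟨by omega, by omega⟩, if_neg hA]

-- corollary: the whole write loop
lemma write_loop (cs : List Char) (N : Nat) (hc : ∀ c ∈ cs, c = '0' ∨ c = '1')
    (hle : cs.length ≤ N) :
    (PySem.List.pyRange (N : Int) ((N : Int) - (cs.length : Int)) (-1)).foldl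
      (fun (p : List Int × Int) j =>
        (PySem.List.pySetD p.1 (j - 1)
          ((PySem.Int.ofChars? [PySem.List.pyGetD cs (p.2 - 1) ' ']).getD 0), p.2 - 1))
      (List.replicate N 0, (cs.length : Int))
    = (List.replicate (N - cs.length) 0 ++ cs.map cval, ((0 : Nat) : Int)) := by
  rw [pyRange_desc]
  have h := write_loop_gen cs N hc hle cs.length 0 (by omega)
  simp only [Nat.sub_zero, List.drop_length, List.map_nil, List.append_nil,
    Nat.cast_zero, Int.sub_zero] at h
  simpa using h

lemma cval_mem (cs : List Char) : ∀ x ∈ cs.map cval, x = 0 ∨ x = 1 := by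
  intro x hx
  rcases List.mem_map.1 hx with ⟨c, _, rfl⟩
  unfold cval
  by_cases h : c = '1' <;> simp [h]

-- the padded bit array of a value, positionally
lemma pad_getD (N : Nat) (m : Nat) (hm : m < 2 ^ N) (hN : 1 ≤ N) (t : Nat) (ht : t < N) :
    (List.replicate (N - (bchars m).length) (0 : Int) ++ (bchars m).map cval).getD t 0
      = if m.testBit (N - 1 - t) then 1 else 0 := by
  have h : List.replicate (N - (bchars m).length) (0 : Int) ++ (bchars m).map cval
      = (List.range N).map (fun z => cval (if m.testBit (N - 1 - z) then '1' else '0')) := by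
    have := bchars_msb N m hm hN
    have h2 := congrArg (List.map cval) this
    rw [List.map_append, List.map_replicate] at h2
    rw [show cval '0' = 0 from rfl] at h2
    rw [h2, List.map_map]
    rfl
  rw [h, PySem.List.getD_map_range _ _ _ _ ht]
  by_cases hb : m.testBit (N - 1 - t) <;> simp [hb, cval]

lemma fold_rows (n : Int) (arr1 arr2 : List Int) (row : Int → String) (l : List Int)
    (h : ∀ ans, ∀ i ∈ l, solStep n arr1 arr2 (ans, [], []) i = (ans ++ [row i], [], [])) :
    ∀ ans, l.foldl (solStep n arr1 arr2) (ans, [], []) = (ans ++ l.map row, [], []) := by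
  induction l with
  | nil => intro ans; simp
  | cons x l ih =>
    intro ans
    rw [List.foldl_cons, h ans x (by simp)]
    rw [ih (fun ans i hi => h ans i (by simp [hi])) (ans ++ [row x])]
    simp

-- per-row equality (Pre_ values, below 2^n)
lemma row_eq (n : Int) (arr1 arr2 : List Int) (N : Nat) (hn : (N : Int) = n)
    (i : Nat) (hi : i < N) (h1l : N ≤ arr1.length) (h2l : N ≤ arr2.length)
    (ha0 : 0 ≤ arr1[i]'(by omega)) (hb0 : 0 ≤ arr2[i]'(by omega))
    (haN : arr1[i]'(by omega) < 2 ^ N) (hbN : arr2[i]'(by omega) < 2 ^ N) :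
    ∀ ans, solStep n arr1 arr2 (ans, [], []) ((i : Nat) : Int)
      = (ans ++ [rowAlt n arr1 arr2 ((i : Nat) : Int)], [], []) := by
  intro ans
  have hN1 : 1 ≤ N := by omega
  have hva' : ((arr1[i]'(by omega)).toNat : Int) = arr1[i]'(by omega) := Int.toNat_of_nonneg ha0
  have hvb' : ((arr2[i]'(by omega)).toNat : Int) = arr2[i]'(by omega) := Int.toNat_of_nonneg hb0
  set va := (arr1[i]'(by omega)).toNat with hva
  set vb := (arr2[i]'(by omega)).toNat with hvb
  have hga : PySem.List.pyGetD arr1 ((i : Nat) : Int) 0 = (va : Int) := by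
    rw [PySem.List.pyGetD_natCast, List.getD_eq_getElem _ _ (by omega), hva']
  have hgb : PySem.List.pyGetD arr2 ((i : Nat) : Int) 0 = (vb : Int) := by
    rw [PySem.List.pyGetD_natCast, List.getD_eq_getElem _ _ (by omega), hvb']
  have hvaN : va < 2 ^ N := by
    have h := haN; rw [← hva'] at h; exact_mod_cast h
  have hvbN : vb < 2 ^ N := by
    have h := hbN; rw [← hvb'] at h; exact_mod_cast h
  have hca := bchars_mem va
  have hcb := bchars_mem vb
  have hlaN : (bchars va).length ≤ N := bchars_length_le N va hvaN hN1
  have hlbN : (bchars vb).length ≤ N := bchars_length_le N vb hvbN hN1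
  have hz : (PySem.List.pyRange 0 ((N : Nat) : Int) 1).foldl
      (fun (p : List Int × List Int) _ => (p.1 ++ [0], p.2 ++ [0])) ([], [])
      = (List.replicate N 0, List.replicate N 0) := by
    rw [zeros_loop]
    rw [PySem.List.pyRange_zero_natCast]
    simp
  have hentries : ∀ (cs : List Char),
      ∀ x ∈ List.replicate (N - cs.length) (0 : Int) ++ cs.map cval, x = 0 ∨ x = 1 := by
    intro cs x hx
    rcases List.mem_append.1 hx with hx | hx
    · exact Or.inl (List.eq_of_mem_replicate hx)
    · exact cval_mem cs x hx
  have hlen : ∀ (cs : List Char), cs.length ≤ N →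
      (List.replicate (N - cs.length) (0 : Int) ++ cs.map cval).length = N := by
    intro cs h; simp; omega
  unfold solStep rowAlt
  rw [← hn]
  simp only [hga, hgb]
  rw [toBinChars_natCast, toBinChars_natCast, hz, write_loop _ N hca hlaN,
    write_loop _ N hcb hlbN]
  simp only []
  rw [res_loop N _ _ (hlen _ hlaN) (hlen _ hlbN) (hentries _) (hentries _)]
  rw [PySem.Int.bor_of_nonneg (by omega) (by omega)]
  simp only [Int.toNat_natCast]
  rw [toBinChars_natCast,
    zfill_digits _ N (bchars_ne_nil _) (bchars_mem _),
    bchars_msb N (va ||| vb) (Nat.or_lt_two_pow hvaN hvbN) hN1, List.map_map]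
  refine congrArg (fun l => (ans ++ [String.ofList l], ([] : List Int), ([] : List Int))) ?_
  apply List.map_congr_left
  intro t ht
  rw [List.mem_range] at ht
  rw [pad_getD N va hvaN hN1 t ht, pad_getD N vb hvbN hN1 t ht]
  simp only [Function.comp_apply, Nat.testBit_or]
  by_cases hA : va.testBit (N - 1 - t) <;> by_cases hB : vb.testBit (N - 1 - t) <;>
    simp [hA, hB]

-- ===== VERDICT (by name: the statement is the Claim_ definition above) =====
theorem solution_spec : Claim_equal_solution := by
  intro n arr1 arr2 _hdom hpre
  rcases hpre with ⟨h1l, h2l, hval⟩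
  unfold Spec_solution solution solution_alt
  rcases le_or_gt n 0 with hn | hn
  · rw [pyRange_nonpos n hn]
    simp
  · have hn' : ((n.toNat : Nat) : Int) = n := Int.toNat_of_nonneg (by omega)
    set N := n.toNat with hN
    have h1l' : N ≤ arr1.length := by omega
    have h2l' : N ≤ arr2.length := by omega
    have hrange : PySem.List.pyRange 0 n 1 = (List.range N).map (fun k : Nat => (k : Int)) := by
      rw [← hn', PySem.List.pyRange_zero_natCast]
    have hrow : ∀ ans, ∀ i ∈ (List.range N).map (fun k : Nat => (k : Int)),
        solStep n arr1 arr2 (ans, [], []) i = (ans ++ [rowAlt n arr1 arr2 i], [], []) := by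
      intro ans i hi
      rcases List.mem_map.1 hi with ⟨t, ht, rfl⟩
      rw [List.mem_range] at ht
      have hmem1 : arr1[t]'(by omega) ∈ arr1.take N ++ arr2.take N := by
        apply List.mem_append_left
        have : arr1[t]'(by omega) = (arr1.take N)[t]'(by simp; omega) := by
          rw [List.getElem_take]
        rw [this]
        exact List.getElem_mem _
      have hmem2 : arr2[t]'(by omega) ∈ arr1.take N ++ arr2.take N := by
        apply List.mem_append_right
        have : arr2[t]'(by omega) = (arr2.take N)[t]'(by simp; omega) := by
          rw [List.getElem_take]
        rw [this]
        exact List.getElem_mem _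
      exact row_eq n arr1 arr2 N hn' t ht h1l' h2l'
        (hval _ hmem1).1 (hval _ hmem2).1 (hval _ hmem1).2 (hval _ hmem2).2 ans
    rw [hrange]
    rw [fold_rows n arr1 arr2 (rowAlt n arr1 arr2) _ hrow []]
    simp
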